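-- pv_equiv track=rewrite | github.com/phamtrungtinhh/NhandangvatthebangAI | scripts/flower_rule_retest_fixed_cases.py | dominant_drop_stage
-- ===== SOURCE A (Python) =====
-- def dominant_drop_stage(flower_stage_counts: dict[str, int]) -> tuple[str | None, int]:
--     order = ["after_nms", "after_resolve_cross_class", "after_flower_pruning", "after_scene_rules", "final"]
--     max_drop = 0
--     max_stage = None
--     prev = None
--     for s in order:
--         cur = int(flower_stage_counts.get(s, 0))
--         if prev is not None:
--             drop = prev - cur
--             if drop > max_drop:
--                 max_drop = drop
--                 max_stage = s
--         prev = cur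
--     return max_stage, max_drop
-- ===== SOURCE B (Python) =====
-- def dominant_drop_stage(flower_stage_counts: dict[str, int]) -> tuple[str | None, int]:
--     order = ["after_nms", "after_resolve_cross_class", "after_flower_pruning", "after_scene_rules", "final"]
--
--     def best(prev, rest):
--         # best positive drop over the suffix 'rest', combined on recursion unwind;
--         # '>=' prefers the earlier stage on ties (matching first-maximal selection)
--         if not rest:
--             return (None, 0)
--         s = rest[0]
--         cur = int(flower_stage_counts.get(s, 0))
--         d = prev - cur
--         bs, bd = best(cur, rest[1:])
--         if d > 0 and d >= bd:
--             return (s, d)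
--         return (bs, bd)
--
--     return best(int(flower_stage_counts.get(order[0], 0)), order[1:])
-- ===== Notes on version B (the rewrite author's own statement) =====
-- stated objective: alternative
-- what changed: Replaced A's forward loop with mutable running-max/prev state by a structural recursion on the stage list that computes the best drop of the suffix and combines it with the current drop on unwinding, using a >=-with-positivity comparison to keep the earliest maximal stage.
import Mathlib
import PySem

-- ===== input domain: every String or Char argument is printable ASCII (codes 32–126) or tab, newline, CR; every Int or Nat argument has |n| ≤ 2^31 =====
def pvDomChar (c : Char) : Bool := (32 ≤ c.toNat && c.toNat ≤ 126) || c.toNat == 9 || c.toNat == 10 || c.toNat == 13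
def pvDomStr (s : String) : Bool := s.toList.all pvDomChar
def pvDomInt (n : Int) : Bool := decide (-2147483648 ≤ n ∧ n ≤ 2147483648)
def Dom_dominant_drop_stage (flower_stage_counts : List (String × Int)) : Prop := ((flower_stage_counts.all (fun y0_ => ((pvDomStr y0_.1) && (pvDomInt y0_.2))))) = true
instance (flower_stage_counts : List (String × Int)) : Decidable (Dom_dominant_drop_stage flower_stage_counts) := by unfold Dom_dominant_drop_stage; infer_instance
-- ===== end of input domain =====

-- B replaces A's forward scan with mutable running-max state by a structural recursion on the
-- stage list, combining the current drop with the best of the suffix on unwinding (objective: alternative).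

-- ===== PORT A =====
-- flower_stage_counts.get(s, 0): first-match lookup in the association list (a Python dict has unique keys)
def pvGetD0 (d : List (String × Int)) (s : String) : Int :=
  ((d.find? (fun p => p.1 == s)).map (fun p => p.2)).getD 0

-- one iteration of A's loop body; state = (max_drop, max_stage, prev)
def pvStep (flower_stage_counts : List (String × Int))
    (acc : Int × Option String × Option Int) (s : String) : Int × Option String × Option Int :=
  let cur := pvGetD0 flower_stage_counts s
  match acc.2.2 with
  | some prev =>
      let drop := prev - cur
      if drop > acc.1 then (drop, some s, some cur) else (acc.1, acc.2.1, some cur)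
  | none => (acc.1, acc.2.1, some cur)

def dominant_drop_stage (flower_stage_counts : List (String × Int)) : Option String × Int :=
  let order := ["after_nms", "after_resolve_cross_class", "after_flower_pruning", "after_scene_rules", "final"]
  let st := order.foldl (pvStep flower_stage_counts) (0, none, none)
  (st.2.1, st.1)

-- ===== PORT B =====
-- best(prev, rest): recursion on the suffix of stages, combining on unwind; '>=' keeps the earlier stage on ties
def pvBest (flower_stage_counts : List (String × Int)) (prev : Int) : List String → Option String × Int
  | [] => (none, 0)
  | s :: rest =>
    let cur := pvGetD0 flower_stage_counts s
    let d := prev - cur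
    let b := pvBest flower_stage_counts cur rest
    if d > 0 ∧ d ≥ b.2 then (some s, d) else b

def dominant_drop_stage_alt (flower_stage_counts : List (String × Int)) : Option String × Int :=
  let order := ["after_nms", "after_resolve_cross_class", "after_flower_pruning", "after_scene_rules", "final"]
  pvBest flower_stage_counts (pvGetD0 flower_stage_counts (order.headD "")) (order.drop 1)

-- ===== PRECONDITION & SPEC =====
def Spec_dominant_drop_stage (flower_stage_counts : List (String × Int)) (out : Option String × Int) : Prop := out = dominant_drop_stage_alt flower_stage_counts
instance (flower_stage_counts : List (String × Int)) (out : Option String × Int) : Decidable (Spec_dominant_drop_stage flower_stage_counts out) := by unfold Spec_dominant_drop_stage; infer_instance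

-- ===== CLAIM (what is proved, stated in full; the proofs are below) =====
def Claim_equal_dominant_drop_stage : Prop := ∀ (flower_stage_counts : List (String × Int)), Dom_dominant_drop_stage flower_stage_counts → Spec_dominant_drop_stage flower_stage_counts (dominant_drop_stage flower_stage_counts)

-- ===== LEMMAS AND PROOFS =====
-- B's recursion returns a strictly positive drop or exactly (none, 0)
theorem pvBest_pos_or_none (f : List (String × Int)) (prev : Int) (l : List String) :
    0 < (pvBest f prev l).2 ∨ pvBest f prev l = (none, 0) := by
  induction l generalizing prev with
  | nil => right; rfl
  | cons s rest ih =>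
    simp only [pvBest]
    split_ifs with h
    · left; exact h.1
    · exact ih _

-- invariant relating A's fold (with prev already set) to B's recursion
theorem pv_inv (f : List (String × Int)) (l : List String) (prev m : Int) (ms : Option String)
    (hm : 0 ≤ m) :
    (let st := l.foldl (pvStep f) (m, ms, some prev); ((st.2.1, st.1) : Option String × Int)) =
      (if (pvBest f prev l).2 > m then pvBest f prev l else (ms, m)) := by
  induction l generalizing prev m ms with
  | nil =>
    simp only [List.foldl, pvBest]
    rw [if_neg (by omega)]
  | cons s rest ih =>
    simp only [List.foldl, pvStep, pvBest]
    by_cases hd : prev - pvGetD0 f s > m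
    · rw [if_pos hd, ih (pvGetD0 f s) (prev - pvGetD0 f s) (some s) (by omega)]
      rcases hB : pvBest f (pvGetD0 f s) rest with ⟨bs, bd⟩
      split_ifs <;> simp_all <;> omega
    · rw [if_neg hd, ih (pvGetD0 f s) m ms hm]
      rcases hB : pvBest f (pvGetD0 f s) rest with ⟨bs, bd⟩
      split_ifs <;> simp_all <;> omega

theorem pv_core (f : List (String × Int)) : dominant_drop_stage f = dominant_drop_stage_alt f := by
  show (let st := List.foldl (pvStep f) (0, none, some (pvGetD0 f "after_nms"))
          ["after_resolve_cross_class", "after_flower_pruning", "after_scene_rules", "final"];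
        ((st.2.1, st.1) : Option String × Int)) =
      pvBest f (pvGetD0 f "after_nms")
        ["after_resolve_cross_class", "after_flower_pruning", "after_scene_rules", "final"]
  rw [pv_inv f ["after_resolve_cross_class", "after_flower_pruning", "after_scene_rules", "final"]
        (pvGetD0 f "after_nms") 0 none (le_refl 0)]
  rcases pvBest_pos_or_none f (pvGetD0 f "after_nms")
      ["after_resolve_cross_class", "after_flower_pruning", "after_scene_rules", "final"] with hb | hb
  · rw [if_pos hb]
  · rw [hb]
    norm_num

-- ===== VERDICT (by name: the statement is the Claim_ definition above) =====
theorem dominant_drop_stage_spec : Claim_equal_dominant_drop_stage := by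
  intro f _
  unfold Spec_dominant_drop_stage
  exact pv_core f
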